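-- pv_equiv track=rewrite | github.com/mariaclaratabosa/M5-PROJETOS | SPRINT-1/A2 - Exercitando loops e condicionais/solution.py | remove_more_than_two_repetitions
-- ===== SOURCE A (Python) =====
-- def remove_more_than_two_repetitions(text: str):
--     result = ""
--     prev_char = ""
--     count = 0
--
--     for char in text:
--         if char == prev_char:
--             count += 1
--         else:
--             count = 1
--         if count <= 2:
--             result += char
--
--         prev_char = char
--
--     return result
-- ===== SOURCE B (Python) =====
-- def remove_more_than_two_repetitions(text):
--     # Run-based scan: find each maximal run of equal characters, keep at most two.
--     result = []
--     i = 0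
--     n = len(text)
--     while i < n:
--         j = i
--         while j < n and text[j] == text[i]:
--             j += 1
--         result.append(text[i] * min(j - i, 2))
--         i = j
--     return "".join(result)
-- ===== Notes on version B (the rewrite author's own statement) =====
-- stated objective: alternative
-- what changed: Replaces the flat prev_char/count state machine with run-length grouping: scan each maximal run of equal characters once and emit min(run length, 2) copies of it.
import Mathlib
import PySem

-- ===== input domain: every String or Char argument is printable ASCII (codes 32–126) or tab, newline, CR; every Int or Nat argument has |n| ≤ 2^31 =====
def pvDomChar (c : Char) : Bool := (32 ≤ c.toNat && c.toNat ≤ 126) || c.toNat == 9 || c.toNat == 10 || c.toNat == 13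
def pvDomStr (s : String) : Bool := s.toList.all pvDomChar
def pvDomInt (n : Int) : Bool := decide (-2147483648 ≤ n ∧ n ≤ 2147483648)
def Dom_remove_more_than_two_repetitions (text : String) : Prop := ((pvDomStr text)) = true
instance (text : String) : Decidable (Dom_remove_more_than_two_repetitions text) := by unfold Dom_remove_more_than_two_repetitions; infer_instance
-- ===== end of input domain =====

-- B replaces A's prev_char/count state machine by a run-length scan (same cost, different decomposition).

-- ===== PORT A =====
-- A's result/prev_char strings are modelled as lists of chars ("" = []); exact on all inputs.
def pvStepA (s : List Char × List Char × Int) (char : Char) : List Char × List Char × Int :=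
  let (result, prev_char, count) := s
  let count := if [char] == prev_char then count + 1 else (1 : Int)
  let result := if count ≤ 2 then result ++ [char] else result
  (result, [char], count)

def remove_more_than_two_repetitions (text : String) : String :=
  String.ofList (text.toList.foldl pvStepA ([], [], 0)).1

-- ===== PORT B =====
-- countLeading c rest = how far the inner `while text[j] == text[i]` advances past the run head.
def pvCountLeading (c : Char) : List Char → Nat
  | [] => 0
  | d :: t => if d == c then pvCountLeading c t + 1 else 0

def pvCapRuns : List Char → List Char
  | [] => []
  | c :: rest =>
    let n := pvCountLeading c rest
    List.replicate (min (n + 1) 2) c ++ pvCapRuns (List.drop n rest)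
termination_by l => l.length
decreasing_by
  simp only [List.length_drop, List.length_cons]
  omega

def remove_more_than_two_repetitions_alt (text : String) : String :=
  String.ofList (pvCapRuns text.toList)

-- ===== PRECONDITION & SPEC =====
def Spec_remove_more_than_two_repetitions (text : String) (out : String) : Prop := out = remove_more_than_two_repetitions_alt text
instance (text : String) (out : String) : Decidable (Spec_remove_more_than_two_repetitions text out) := by unfold Spec_remove_more_than_two_repetitions; infer_instance

-- ===== CLAIM (what is proved, stated in full; the proofs are below) =====
def Claim_equal_remove_more_than_two_repetitions : Prop := ∀ (text : String), Dom_remove_more_than_two_repetitions text → Spec_remove_more_than_two_repetitions text (remove_more_than_two_repetitions text)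

-- ===== LEMMAS AND PROOFS =====

-- functional unrolling of A's loop state (prev_char, count)
def pvFA (prev : List Char) (count : Int) : List Char → List Char
  | [] => []
  | c :: rest =>
    let count' := if [c] == prev then count + 1 else (1 : Int)
    (if count' ≤ 2 then [c] else []) ++ pvFA [c] count' rest

theorem pvFoldA_eq (l : List Char) : ∀ (res prev : List Char) (count : Int),
    (l.foldl pvStepA (res, prev, count)).1 = res ++ pvFA prev count l := by
  induction l with
  | nil => intro res prev count; simp [pvFA]
  | cons c t ih =>
    intro res prev count
    simp only [List.foldl_cons, pvStepA, pvFA]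
    by_cases h : [c] == prev
    · simp only [h, if_true]
      by_cases h2 : count + 1 ≤ 2 <;> simp [h2, ih, List.append_assoc]
    · simp only [h]
      simp [ih, List.append_assoc, show ((1:Int) ≤ 2) by omega]

theorem pvFA_cons_ne (c : Char) (t prev : List Char) (k : Int) (h : [c] ≠ prev) :
    pvFA prev k (c :: t) = c :: pvFA [c] 1 t := by
  simp [pvFA, h, show ((1:Int) ≤ 2) by omega]

theorem pvFA_big (l : List Char) : ∀ (c : Char) (k₁ k₂ : Int), 2 ≤ k₁ → 2 ≤ k₂ →
    pvFA [c] k₁ l = pvFA [c] k₂ l := by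
  induction l with
  | nil => intros; rfl
  | cons d t ih =>
    intro c k₁ k₂ h1 h2
    by_cases h : d = c
    · subst h
      simp only [pvFA, beq_self_eq_true, if_true]
      rw [if_neg (by omega), if_neg (by omega)]
      simpa using ih d (k₁ + 1) (k₂ + 1) (by omega) (by omega)
    · rw [pvFA_cons_ne d t [c] k₁ (by simp [h]), pvFA_cons_ne d t [c] k₂ (by simp [h])]

theorem pvFA_run (m : Nat) : ∀ (c : Char) (k : Int), 2 ≤ k → ∀ l,
    pvFA [c] k (List.replicate m c ++ l) = pvFA [c] k l := by
  induction m with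
  | zero => intros; rfl
  | succ m ih =>
    intro c k hk l
    simp only [List.replicate_succ, List.cons_append, pvFA, beq_self_eq_true, if_true]
    rw [if_neg (by omega)]
    simp only [List.nil_append]
    rw [ih c (k + 1) (by omega) l, pvFA_big l c (k + 1) k (by omega) hk]

theorem pvCountLeading_take (rest : List Char) : ∀ c,
    List.take (pvCountLeading c rest) rest = List.replicate (pvCountLeading c rest) c := by
  induction rest with
  | nil => intro c; rfl
  | cons d t ih =>
    intro c
    by_cases h : d = c
    · subst h; simp [pvCountLeading, List.replicate_succ, ih]
    · simp [pvCountLeading, h]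

theorem pvCountLeading_drop_ne (rest : List Char) : ∀ c d t,
    List.drop (pvCountLeading c rest) rest = d :: t → d ≠ c := by
  induction rest with
  | nil => intro c d t h; simp at h
  | cons e t' ih =>
    intro c d t h
    by_cases he : e = c
    · subst he; simp [pvCountLeading] at h; exact ih e d t h
    · simp [pvCountLeading, he] at h
      rw [← h.1]; exact he

theorem pvFA_fresh (l : List Char) (c : Char) (k : Int) (hh : ∀ d t, l = d :: t → d ≠ c) :
    pvFA [c] k l = pvFA [] 0 l := by
  cases l with
  | nil => rfl
  | cons d t =>
    have hd : d ≠ c := hh d t rfl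
    rw [pvFA_cons_ne d t [c] k (by simp [hd]), pvFA_cons_ne d t [] 0 (by simp)]

theorem pvCapRuns_cons (c : Char) (rest : List Char) :
    pvCapRuns (c :: rest) = List.replicate (min (pvCountLeading c rest + 1) 2) c ++
      pvCapRuns (List.drop (pvCountLeading c rest) rest) := by
  rw [pvCapRuns]

theorem pvMain (N : Nat) : ∀ (l : List Char), l.length ≤ N → pvFA [] 0 l = pvCapRuns l := by
  induction N with
  | zero =>
    intro l h
    rw [List.length_eq_zero_iff.mp (Nat.le_zero.mp h)]
    simp [pvFA, pvCapRuns]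
  | succ N ih =>
    intro l hl
    cases l with
    | nil => simp [pvFA, pvCapRuns]
    | cons c rest =>
      obtain ⟨n, hn⟩ : ∃ n, pvCountLeading c rest = n := ⟨_, rfl⟩
      have hsplit : rest = List.replicate n c ++ List.drop n rest := by
        conv_lhs => rw [← List.take_append_drop n rest]
        rw [← hn, pvCountLeading_take]
      have hrest' : pvFA [] 0 (List.drop n rest) = pvCapRuns (List.drop n rest) := by
        apply ih
        simp only [List.length_drop]
        simp at hl; omega
      have hfresh : ∀ d t, List.drop n rest = d :: t → d ≠ c := by
        rw [← hn]; exact pvCountLeading_drop_ne rest c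
      rw [pvFA_cons_ne c rest [] 0 (by simp), pvCapRuns_cons, hn]
      cases n with
      | zero =>
        simp only [List.drop_zero] at hrest' hfresh
        rw [pvFA_fresh rest c 1 hfresh, hrest']
        simp only [List.drop_zero]
        rfl
      | succ m =>
        conv_lhs => rw [hsplit]
        simp only [List.replicate_succ, List.cons_append, pvFA, beq_self_eq_true, if_true]
        rw [if_pos (by omega)]
        simp only [List.singleton_append]
        rw [show (1 : Int) + 1 = 2 from by norm_num, pvFA_run m c 2 (by omega), pvFA_fresh _ c 2 hfresh, hrest']
        have h2 : min (m + 1 + 1) 2 = 2 := by omega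
        rw [h2]
        rfl

-- ===== VERDICT (by name: the statement is the Claim_ definition above) =====
theorem remove_more_than_two_repetitions_spec : Claim_equal_remove_more_than_two_repetitions := by
  intro text _
  unfold Spec_remove_more_than_two_repetitions remove_more_than_two_repetitions
    remove_more_than_two_repetitions_alt
  rw [pvFoldA_eq text.toList [] [] 0, List.nil_append,
    pvMain text.toList.length text.toList le_rfl]
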